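-- pv_equiv track=rewrite | github.com/cyless-hj/TIL | Algorithm/Programmers/PCCP/Mock Test/외톨이 알파벳.py | solution
-- ===== SOURCE A (Python) =====
-- def solution(input_string):
--     answer = ''
--     answer_list = []
--     dic = {}
--     for idx, alpha in enumerate(input_string):
--         if alpha not in dic:
--             dic[alpha] = [idx]
--         else:
--             dic[alpha].append(idx)
--     for key, value in dic.items():
--         if len(value) >= 2:
--             for i in range(len(value) - 1):
--                 if abs(value[i] - value[i + 1]) > 1:
--                     answer_list.append(key)
--                     break
--
--     answer = ''.join(sorted(answer_list))
--     if not answer: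
--         return 'N'
--     return answer
-- ===== SOURCE B (Python) =====
-- def solution(input_string):
--     last = {}
--     lonely = set()
--     for idx, alpha in enumerate(input_string):
--         if alpha in last and idx - last[alpha] > 1:
--             lonely.add(alpha)
--         last[alpha] = idx
--     answer = ''.join(sorted(lonely))
--     return answer if answer else 'N'
-- ===== Notes on version B (the rewrite author's own statement) =====
-- stated objective: simpler
-- what changed: B replaces A's two-phase algorithm (build a position list per letter, then scan each list for an adjacent gap) with a single streaming pass that keeps only each letter's last index and a set of flagged letters.
import Mathlib
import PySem

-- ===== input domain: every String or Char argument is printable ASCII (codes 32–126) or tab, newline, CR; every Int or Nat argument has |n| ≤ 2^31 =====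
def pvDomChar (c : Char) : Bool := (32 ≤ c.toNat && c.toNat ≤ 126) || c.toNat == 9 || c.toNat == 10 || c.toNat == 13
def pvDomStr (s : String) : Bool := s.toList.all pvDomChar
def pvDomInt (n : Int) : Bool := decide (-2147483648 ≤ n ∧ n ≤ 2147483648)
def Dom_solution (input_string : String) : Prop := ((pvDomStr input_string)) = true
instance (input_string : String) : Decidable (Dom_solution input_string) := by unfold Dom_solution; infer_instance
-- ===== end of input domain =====

-- B replaces A's two-phase "build every letter's position list, then scan each list"
-- with one streaming pass keeping only each letter's last index and a flag set (same output).

-- ===== PORT A =====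
-- inner loop 'for i in range(len(value)-1): if abs(value[i]-value[i+1]) > 1: …; break'
-- rendered as the adjacent-pair scan over the same list, stopping (true) at the first gap — exact
def hasGapLoop : List Int → Bool
  | a :: b :: t => if 1 < (a - b).natAbs then true else hasGapLoop (b :: t)
  | _ => false

-- body of A's first loop ('if alpha not in dic: dic[alpha]=[idx] else: dic[alpha].append(idx)')
def aBuildStep (d : PySem.Dict Char (List Int)) (p : Int × Char) : PySem.Dict Char (List Int) :=
  if d.contains p.2 = false then d.insert p.2 [p.1] else d.insert p.2 (d.getD p.2 [] ++ [p.1])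

-- body of A's second loop over dic.items()
def aCollectStep (acc : List Char) (kv : Char × List Int) : List Char :=
  if 2 ≤ kv.2.length then (if hasGapLoop kv.2 then acc ++ [kv.1] else acc) else acc

def solution (input_string : String) : String :=
  let dic := (PySem.List.enumerate input_string.toList 0).foldl aBuildStep PySem.Dict.empty
  let answer_list := dic.items.foldl aCollectStep []
  let answer := String.mk (PySem.List.sorted answer_list (fun x => x) false)
  if answer = "" then "N" else answer

-- ===== PORT B =====
-- body of B's single loop: flag alpha if seen before with a gap > 1, then record its index
def bStep (st : PySem.Dict Char Int × PySem.Set Char) (p : Int × Char) :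
    PySem.Dict Char Int × PySem.Set Char :=
  (st.1.insert p.2 p.1,
   if st.1.contains p.2 && decide (1 < p.1 - st.1.getD p.2 0) then PySem.Set.add st.2 p.2 else st.2)

def solution_alt (input_string : String) : String :=
  let st := (PySem.List.enumerate input_string.toList 0).foldl bStep
    (PySem.Dict.empty, PySem.Set.empty)
  let answer := String.mk (PySem.List.sorted st.2 (fun x => x) false)
  if answer = "" then "N" else answer

-- ===== PRECONDITION & SPEC =====
def Spec_solution (input_string : String) (out : String) : Prop := out = solution_alt input_string
instance (input_string : String) (out : String) : Decidable (Spec_solution input_string out) := by unfold Spec_solution; infer_instance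

-- ===== CLAIM (what is proved, stated in full; the proofs are below) =====
def Claim_equal_solution : Prop := ∀ (input_string : String), Dom_solution input_string → Spec_solution input_string (solution input_string)

-- ===== LEMMAS AND PROOFS =====

-- the positions at which c occurs in an enumerated list
def pvPos (l : List (Int × Char)) (c : Char) : List Int :=
  (l.filter (fun p => p.2 == c)).map (·.1)

theorem pvPos_cons (q : Int × Char) (l : List (Int × Char)) (c : Char) :
    pvPos (q :: l) c = if q.2 = c then q.1 :: pvPos l c else pvPos l c := by
  simp [pvPos, List.filter_cons]
  split_ifs with h
  · simp
  · rfl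

theorem hasGapLoop_length {v : List Int} (h : hasGapLoop v = true) : 2 ≤ v.length := by
  match v with
  | [] => simp [hasGapLoop] at h
  | [a] => simp [hasGapLoop] at h
  | a :: b :: t => simp

-- A's dict build: each key's value is its list of positions
theorem getD_buildA (l : List (Int × Char)) (d : PySem.Dict Char (List Int)) (c : Char) :
    (l.foldl aBuildStep d).getD c [] = d.getD c [] ++ pvPos l c := by
  induction l generalizing d with
  | nil => simp [pvPos]
  | cons q t ih =>
    rw [List.foldl_cons, ih, pvPos_cons]
    have hstep : (aBuildStep d q).getD c [] =
        if q.2 = c then d.getD c [] ++ [q.1] else d.getD c [] := by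
      unfold aBuildStep
      by_cases h : c = q.2
      · subst h
        by_cases hc : d.contains q.2
        · simp [hc]
        · have hc' : d.contains q.2 = false := by simpa using hc
          have h0 : d.getD q.2 ([] : List Int) = [] :=
            PySem.Dict.getD_of_not_contains d [] hc'
          simp [hc', h0]
      · have h' : ¬ q.2 = c := fun hh => h hh.symm
        by_cases hc : d.contains q.2
        · simp [hc, PySem.Dict.getD_insert, h, h']
        · have hc' : d.contains q.2 = false := by simpa using hc
          simp [hc', PySem.Dict.getD_insert, h, h']
    rw [hstep]
    split_ifs with h <;> simp

theorem nodup_keys_buildA (l : List (Int × Char)) :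
    ((l.foldl aBuildStep PySem.Dict.empty).keys).Nodup := by
  have h : l.foldl aBuildStep PySem.Dict.empty =
      l.foldl (fun d p => d.insert p.2
        (if d.contains p.2 = false then [p.1] else d.getD p.2 [] ++ [p.1]))
        PySem.Dict.empty := by
    apply PySem.List.foldl_congr_mem
    intro d p _
    unfold aBuildStep
    by_cases hc : d.contains p.2 = false <;> simp [hc]
  rw [h]
  exact PySem.Dict.nodup_keys_foldl_insert_key l (fun p => p.2)
    (fun d p => if d.contains p.2 = false then [p.1] else d.getD p.2 [] ++ [p.1])
    PySem.Dict.empty PySem.Dict.nodup_keys_empty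

theorem collectA_eq_filter (d : PySem.Dict Char (List Int)) :
    d.items.foldl aCollectStep [] =
      ((d.items.filter fun kv => decide (2 ≤ kv.2.length) && hasGapLoop kv.2).map fun kv => kv.1) := by
  have h : d.items.foldl aCollectStep ([] : List Char) =
      d.items.foldl (fun acc kv =>
        if (decide (2 ≤ kv.2.length) && hasGapLoop kv.2) then acc ++ [kv.1] else acc) [] := by
    apply PySem.List.foldl_congr_mem
    intro acc kv _
    unfold aCollectStep
    by_cases h1 : 2 ≤ kv.2.length <;> by_cases h2 : hasGapLoop kv.2 <;> simp [h1, h2]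
  rw [h, PySem.List.foldl_append_if]
  simp

-- A's collect loop membership characterisation
theorem mem_collectA (d : PySem.Dict Char (List Int)) (hnd : d.keys.Nodup) (c : Char) :
    c ∈ d.items.foldl aCollectStep [] ↔ hasGapLoop (d.getD c []) = true := by
  rw [collectA_eq_filter]
  simp only [List.mem_map, List.mem_filter]
  constructor
  · rintro ⟨kv, ⟨hmem, hp⟩, rfl⟩
    have hv : d.getD kv.1 [] = kv.2 :=
      PySem.Dict.getD_of_mem_items (d := d) (d0 := []) (by simpa using hmem) hnd
    rw [hv]
    simpa using (by simpa using hp : 2 ≤ kv.2.length ∧ hasGapLoop kv.2 = true).2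
  · intro hg
    by_cases hc : d.contains c
    · have hs : (d.get? c).isSome := by
        rw [← PySem.Dict.contains_eq_isSome_get?]; exact hc
      obtain ⟨v, hv⟩ := Option.isSome_iff_exists.mp hs
      have hgd : d.getD c [] = v := PySem.Dict.getD_of_get?_eq_some d [] hv
      refine ⟨(c, v), ⟨PySem.Dict.mem_items_of_get?_eq_some d hv, ?_⟩, rfl⟩
      rw [hgd] at hg
      simpa [hg] using hasGapLoop_length hg
    · have hc' : d.contains c = false := by simpa using hc
      rw [PySem.Dict.getD_of_not_contains d [] hc'] at hg
      simp [hasGapLoop] at hg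

theorem nodup_collectA (d : PySem.Dict Char (List Int)) (hnd : d.keys.Nodup) :
    (d.items.foldl aCollectStep []).Nodup := by
  rw [collectA_eq_filter]
  exact hnd.sublist (by
    have hs : (d.items.filter fun kv => decide (2 ≤ kv.2.length) && hasGapLoop kv.2).Sublist d.items :=
      List.filter_sublist
    simpa [PySem.Dict.keys] using hs.map (fun kv => kv.1))

-- B's single pass invariant
theorem B_inv (xs : List Char) (n : Int) (last : PySem.Dict Char Int) (lonely : PySem.Set Char)
    (hl : ∀ c v, last.get? c = some v → v < n) (hnd : lonely.Nodup) :
    (((PySem.List.enumerate xs n).foldl bStep (last, lonely)).2.Nodup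
     ∧ ∀ c, (c ∈ ((PySem.List.enumerate xs n).foldl bStep (last, lonely)).2 ↔
         c ∈ lonely ∨ hasGapLoop ((last.get? c).toList ++ pvPos (PySem.List.enumerate xs n) c) = true)) := by
  induction xs generalizing n last lonely with
  | nil =>
    refine ⟨by simpa using hnd, fun c => ?_⟩
    simp only [PySem.List.enumerate_nil, List.foldl_nil, pvPos, List.filter_nil, List.map_nil,
      List.append_nil]
    cases last.get? c <;> simp [hasGapLoop]
  | cons a t ih =>
    rw [PySem.List.enumerate_cons, List.foldl_cons]
    have hbs : bStep (last, lonely) (n, a) =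
        (last.insert a n,
         if last.contains a && decide (1 < n - last.getD a 0) then PySem.Set.add lonely a
         else lonely) := rfl
    rw [hbs]
    set L' := if last.contains a && decide (1 < n - last.getD a 0) then PySem.Set.add lonely a
      else lonely with hL'
    have hl' : ∀ c v, (last.insert a n).get? c = some v → v < n + 1 := by
      intro c v h
      by_cases hca : c = a
      · subst hca
        rw [PySem.Dict.get?_insert_self] at h
        injection h with h'
        omega
      · rw [PySem.Dict.get?_insert_of_ne _ _ hca] at h
        have := hl c v h; omega
    have hnd' : L'.Nodup := by
      rw [hL']; split_ifs
      · exact PySem.Set.nodup_add _ _ hnd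
      · exact hnd
    obtain ⟨H1, H2⟩ := ih (n + 1) (last.insert a n) L' hl' hnd'
    refine ⟨H1, fun c => ?_⟩
    rw [H2 c]
    by_cases hca : c = a
    · subst hca
      rw [PySem.Dict.get?_insert_self, pvPos_cons]
      cases hlast : last.get? c with
      | none =>
        have hcont : last.contains c = false := by
          rw [PySem.Dict.contains_eq_isSome_get?, hlast]; rfl
        rw [hL']
        simp [hcont]
      | some v =>
        have hcont : last.contains c = true := by
          rw [PySem.Dict.contains_eq_isSome_get?, hlast]; rfl
        have hgd : last.getD c 0 = v := PySem.Dict.getD_of_get?_eq_some last 0 hlast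
        have hv : v < n := hl c v hlast
        rw [hL']
        by_cases hgap : 1 < n - v
        · have habs : 1 < (v - n).natAbs := by omega
          simp [hcont, hgd, hgap, hasGapLoop, habs, PySem.Set.mem_add]
        · have habs : ¬ 1 < (v - n).natAbs := by omega
          simp [hcont, hgd, hgap, hasGapLoop, habs]
    · have hca' : ¬ a = c := fun h => hca h.symm
      rw [PySem.Dict.get?_insert_of_ne _ _ hca, pvPos_cons]
      simp only [if_neg hca']
      have hmem : c ∈ L' ↔ c ∈ lonely := by
        rw [hL']; split_ifs
        · rw [PySem.Set.mem_add]
          simp [hca]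
        · exact Iff.rfl
      rw [hmem]

-- ===== VERDICT (by name: the statement is the Claim_ definition above) =====
theorem solution_spec : Claim_equal_solution := by
  intro s _hdom
  show solution s = solution_alt s
  have hempty : ∀ c : Char, (PySem.Dict.empty : PySem.Dict Char Int).get? c = none := by
    intro c; simp [PySem.Dict.get?_empty]
  obtain ⟨hndB, hmemB⟩ := B_inv s.toList 0 PySem.Dict.empty PySem.Set.empty
    (by intro c v h; rw [hempty] at h; exact absurd h (by simp)) List.nodup_nil
  have hkeys := nodup_keys_buildA (PySem.List.enumerate s.toList 0)
  have hgd : ∀ c, ((PySem.List.enumerate s.toList 0).foldl aBuildStep PySem.Dict.empty).getD c []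
      = pvPos (PySem.List.enumerate s.toList 0) c := by
    intro c
    rw [getD_buildA]
    simp [PySem.Dict.getD_empty]
  have hmemA : ∀ c, c ∈ ((PySem.List.enumerate s.toList 0).foldl aBuildStep
        PySem.Dict.empty).items.foldl aCollectStep [] ↔
      hasGapLoop (pvPos (PySem.List.enumerate s.toList 0) c) = true := by
    intro c
    rw [mem_collectA _ hkeys c, hgd]
  have hmemB' : ∀ c, c ∈ ((PySem.List.enumerate s.toList 0).foldl bStep
        (PySem.Dict.empty, PySem.Set.empty)).2 ↔
      hasGapLoop (pvPos (PySem.List.enumerate s.toList 0) c) = true := by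
    intro c
    rw [hmemB c, hempty c]
    simp [PySem.Set.empty]
  have hperm : (((PySem.List.enumerate s.toList 0).foldl aBuildStep
        PySem.Dict.empty).items.foldl aCollectStep []).Perm
      (((PySem.List.enumerate s.toList 0).foldl bStep (PySem.Dict.empty, PySem.Set.empty)).2) :=
    (List.perm_ext_iff_of_nodup (nodup_collectA _ hkeys) hndB).mpr
      (fun c => (hmemA c).trans (hmemB' c).symm)
  have hs := PySem.List.sorted_eq_sorted_of_perm _ _ (fun x : Char => x)
    (fun _ _ h => h) hperm
  unfold solution solution_alt
  simp only [hs]
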